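-- pv_equiv track=rewrite | github.com/Choimoe/MaidataStatistic | effect/pattern.py | check_target_pattern
-- ===== SOURCE A (Python) =====
-- from typing import Callable, Dict, List, Optional, Generator, List, Sequence, TypeVar
-- from typing import Callable, Dict, List, Optional, Generator, List, Sequence, TypeVar
--
-- T = TypeVar('T')
--
-- def sliding_window(sequence: Sequence[T], window_size: int) -> Generator[Sequence[T], None, None]:
--     """
--     Generates sliding windows of specified size over the input sequence.
--
--     Args:
--         sequence: Input sequence to process
--         window_size: Number of elements in each window
--
--     Yields:
--         Consecutive subsequences of specified window size
--
--     Example: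
--         > > > list(sliding_window([1,2,3,4,5], 3))
--         [[1,2,3], [2,3,4], [3,4,5]]
--     """
--     for i in range(len(sequence) - window_size + 1):
--         yield sequence[i:i + window_size]
--
-- def check_target_pattern(temporal_roots: Sequence[List[str]], target_pattern: Sequence[str]) -> bool:
--     """
--     Detects consecutive target pattern across temporal positions.
--
--     Args:
--         temporal_roots: Sequence of root note groups, where each group
--             represents notes in a temporal position
--         target_pattern: Sequence of target note
--             Example: ['1', '8', '1', '8', '1', '8', '1', '8']
--
--     Returns:
--         True if pattern is found in any N-consecutive-position window
--     """
--
--     # Early exit if not enough temporal positions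
--     if len(temporal_roots) < len(target_pattern):
--         return False
--
--     # Check each window of consecutive temporal positions
--     for time_window in sliding_window(temporal_roots, len(target_pattern)):
--         # Verify each position contains the required root(s)
--         if all(
--                 # Check if target note exists in current time slot
--                 any(note == target for note in time_slot)
--                 for time_slot, target in zip(time_window, target_pattern)
--         ):
--             return True
--     return False
-- ===== SOURCE B (Python) =====
-- from typing import List, Sequence
--
-- def check_target_pattern(temporal_roots: Sequence[List[str]], target_pattern: Sequence[str]) -> bool:
--     """One forward pass maintaining live match-progress indices (NFA-style),
--     instead of re-checking every sliding window."""
--     m = len(target_pattern)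
--     if m == 0:
--         return True
--     if len(temporal_roots) < m:
--         return False
--     live = []  # indices j: the last j positions matched target_pattern[:j], j < m
--     for slot in temporal_roots:
--         advanced = []
--         for j in [0] + live:  # seed a fresh candidate, then advance the live ones
--             if target_pattern[j] in slot:
--                 if j + 1 == m:
--                     return True
--                 advanced.append(j + 1)
--         live = advanced
--     return False
-- ===== Notes on version B (the rewrite author's own statement) =====
-- stated objective: alternative
-- what changed: Replaced the sliding-window re-scan (every length-m window rebuilt by slicing and rechecked from scratch) by a single forward pass that maintains a list of live match-progress indices, advancing each candidate per position and returning True as soon as one reaches the full pattern length.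
import Mathlib
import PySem

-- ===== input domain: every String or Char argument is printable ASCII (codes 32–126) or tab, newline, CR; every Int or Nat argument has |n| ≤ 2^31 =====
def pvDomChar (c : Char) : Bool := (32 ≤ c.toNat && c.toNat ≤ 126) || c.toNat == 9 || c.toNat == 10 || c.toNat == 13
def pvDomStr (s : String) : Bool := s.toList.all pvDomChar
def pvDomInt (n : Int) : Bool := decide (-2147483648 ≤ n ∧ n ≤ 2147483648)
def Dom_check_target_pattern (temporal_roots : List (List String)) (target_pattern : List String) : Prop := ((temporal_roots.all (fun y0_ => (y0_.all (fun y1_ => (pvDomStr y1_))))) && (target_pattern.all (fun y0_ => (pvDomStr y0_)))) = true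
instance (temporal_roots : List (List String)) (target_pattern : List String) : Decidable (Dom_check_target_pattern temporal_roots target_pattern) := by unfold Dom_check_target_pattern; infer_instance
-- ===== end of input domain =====

-- B replaces A's window-by-window re-scan with one forward pass over the positions
-- that maintains live match-progress indices (objective: alternative algorithm, same cost class).

-- ===== PORT A =====
-- sliding_window(sequence, window_size): list of slices sequence[i:i+window_size]
def slidingWindow (sequence : List (List String)) (window_size : Int) : List (List (List String)) :=
  (PySem.List.pyRange 0 ((sequence.length : Int) - window_size + 1) 1).map
    (fun i => PySem.List.slice sequence (some i) (some (i + window_size)))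

def check_target_pattern (temporal_roots : List (List String)) (target_pattern : List String) : Bool :=
  if temporal_roots.length < target_pattern.length then false
  else
    (slidingWindow temporal_roots (target_pattern.length : Int)).any
      (fun time_window =>
        (time_window.zip target_pattern).all
          (fun p => p.1.any (fun note => note == p.2)))

-- ===== PORT B =====
-- inner `for j in [0] + live` loop: advance candidates; `none` signals the early `return True`.
-- target_pattern[j] is always in range here (j < m = target_pattern.length), so getD is exact.
def stepCands (target_pattern : List String) (m : Nat) (slot : List String) : List Nat → Option (List Nat)
  | [] => some []
  | j :: rest =>
    if slot.contains (target_pattern.getD j "") then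
      if j + 1 == m then none
      else (stepCands target_pattern m slot rest).map (fun l => (j + 1) :: l)
    else stepCands target_pattern m slot rest

-- outer `for slot in temporal_roots` loop with accumulator `live`
def runSlots (target_pattern : List String) (m : Nat) : List Nat → List (List String) → Bool
  | _, [] => false
  | live, slot :: rest =>
    match stepCands target_pattern m slot (0 :: live) with
    | none => true
    | some live' => runSlots target_pattern m live' rest

def check_target_pattern_alt (temporal_roots : List (List String)) (target_pattern : List String) : Bool :=
  if target_pattern.length == 0 then true
  else if temporal_roots.length < target_pattern.length then false
  else runSlots target_pattern target_pattern.length [] temporal_roots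

-- ===== PRECONDITION & SPEC =====
def Spec_check_target_pattern (temporal_roots : List (List String)) (target_pattern : List String) (out : Bool) : Prop := out = check_target_pattern_alt temporal_roots target_pattern
instance (temporal_roots : List (List String)) (target_pattern : List String) (out : Bool) : Decidable (Spec_check_target_pattern temporal_roots target_pattern out) := by unfold Spec_check_target_pattern; infer_instance

-- ===== CLAIM (what is proved, stated in full; the proofs are below) =====
def Claim_equal_check_target_pattern : Prop := ∀ (temporal_roots : List (List String)) (target_pattern : List String), Dom_check_target_pattern temporal_roots target_pattern → Spec_check_target_pattern temporal_roots target_pattern (check_target_pattern temporal_roots target_pattern)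

-- ===== LEMMAS AND PROOFS =====

-- pmatch tp slots: tp matches the first tp.length slots (false if slots run out)
def pmatch : List String → List (List String) → Bool
  | [], _ => true
  | _ :: _, [] => false
  | t :: ts, s :: ss => s.contains t && pmatch ts ss

-- some suffix (any start position) of slots begins with a full match of tp
def anyStart (tp : List String) : List (List String) → Bool
  | [] => false
  | s :: ss => pmatch tp (s :: ss) || anyStart tp ss

theorem any_congr_mem {α : Type} (l : List α) {p q : α → Bool} (h : ∀ a ∈ l, p a = q a) :
    l.any p = l.any q := by
  induction l with
  | nil => rfl
  | cons a l ih =>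
    simp only [List.any_cons, h a List.mem_cons_self,
      ih (fun b hb => h b (List.mem_cons_of_mem _ hb))]

theorem any_range_succ (N : Nat) (f : Nat → Bool) :
    (List.range (N + 1)).any f = (f 0 || (List.range N).any (fun k => f (k + 1))) := by
  rw [List.range_succ_eq_map]
  simp only [List.any_cons, List.any_map, Function.comp_def, Nat.succ_eq_add_one]

theorem pmatch_of_short (tp : List String) : ∀ slots : List (List String),
    slots.length < tp.length → pmatch tp slots = false := by
  induction tp with
  | nil => intro slots h; simp at h
  | cons t ts ih =>
    intro slots h
    cases slots with
    | nil => rfl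
    | cons s ss =>
      simp only [pmatch, ih ss (by simpa using Nat.lt_of_succ_lt_succ h), Bool.and_false]

theorem anyStart_of_short (tp : List String) : ∀ slots : List (List String),
    slots.length < tp.length → anyStart tp slots = false := by
  intro slots
  induction slots with
  | nil => intro _; rfl
  | cons s ss ih =>
    intro h
    simp only [anyStart, pmatch_of_short tp _ h, Bool.false_or]
    exact ih (Nat.lt_of_le_of_lt (by simp) h)

theorem stepCands_eq (tp : List String) (m : Nat) (slot : List String) :
    ∀ cands : List Nat, stepCands tp m slot cands =
      if ∃ j ∈ cands, tp[j]?.getD "" ∈ slot ∧ j + 1 = m then none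
      else some ((cands.filter (fun j => slot.contains (tp.getD j ""))).map (· + 1)) := by
  intro cands
  induction cands with
  | nil => simp [stepCands]
  | cons j rest ih =>
    by_cases hc : tp[j]?.getD "" ∈ slot
    · have hc' : slot.contains (tp.getD j "") = true := by simpa using hc
      by_cases hjm : j + 1 = m
      · have hex : ∃ x ∈ j :: rest, tp[x]?.getD "" ∈ slot ∧ x + 1 = m :=
          ⟨j, List.mem_cons_self, hc, hjm⟩
        simp [stepCands, hc, hjm, hex]
      · by_cases hex : ∃ x ∈ rest, tp[x]?.getD "" ∈ slot ∧ x + 1 = m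
        · have hex' : ∃ x ∈ j :: rest, tp[x]?.getD "" ∈ slot ∧ x + 1 = m := by
            rcases hex with ⟨x, hx, h1, h2⟩; exact ⟨x, List.mem_cons_of_mem _ hx, h1, h2⟩
          simp [stepCands, hc, hjm, ih, hex, hex']
        · have hex' : ¬ ∃ x ∈ j :: rest, tp[x]?.getD "" ∈ slot ∧ x + 1 = m := by
            rintro ⟨x, hx, h1, h2⟩
            rcases List.mem_cons.mp hx with rfl | hx'
            · exact hjm h2
            · exact hex ⟨x, hx', h1, h2⟩
          simp [stepCands, hc, hjm, ih, hex, hex']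
    · have hc' : slot.contains (tp.getD j "") = false := by simpa using hc
      have hiff : (∃ x ∈ j :: rest, tp[x]?.getD "" ∈ slot ∧ x + 1 = m) ↔
          (∃ x ∈ rest, tp[x]?.getD "" ∈ slot ∧ x + 1 = m) := by
        constructor
        · rintro ⟨x, hx, h1, h2⟩
          rcases List.mem_cons.mp hx with rfl | hx'
          · exact absurd h1 hc
          · exact ⟨x, hx', h1, h2⟩
        · rintro ⟨x, hx, h1, h2⟩; exact ⟨x, List.mem_cons_of_mem _ hx, h1, h2⟩
      simp [stepCands, hc, hiff, ih]

-- tp.drop j with j < tp.length starts with tp.getD j ""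
theorem drop_eq_getD_cons (tp : List String) (j : Nat) (h : j < tp.length) :
    tp.drop j = tp.getD j "" :: tp.drop (j + 1) := by
  rw [List.drop_eq_getElem_cons h, List.getD_eq_getElem tp _ h]

-- main B-side invariant
theorem runSlots_eq (tp : List String) (hm : 0 < tp.length) :
    ∀ (slots : List (List String)) (live : List Nat), (∀ j ∈ live, j < tp.length) →
      runSlots tp tp.length live slots =
        (live.any (fun j => pmatch (tp.drop j) slots) || anyStart tp slots) := by
  intro slots
  induction slots with
  | nil =>
    intro live hlive
    have : ∀ j ∈ live, pmatch (tp.drop j) [] = false := by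
      intro j hj
      exact pmatch_of_short _ _ (by simp [hlive j hj])
    simp only [runSlots, anyStart, Bool.or_false]
    symm; simp only [List.any_eq_false]
    intro j hj; simp [this j hj]
  | cons slot rest ih =>
    intro live hlive
    have h0 : ∀ j ∈ (0 :: live), j < tp.length := by
      intro j hj; rcases List.mem_cons.mp hj with h | h
      · omega
      · exact hlive j h
    have hpm : ∀ j, j < tp.length → pmatch (tp.drop j) (slot :: rest) =
        (slot.contains (tp.getD j "") && pmatch (tp.drop (j + 1)) rest) := by
      intro j hj
      rw [drop_eq_getD_cons tp j hj]
      rfl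
    by_cases hfound : ∃ j ∈ (0 :: live), tp[j]?.getD "" ∈ slot ∧ j + 1 = tp.length
    · have hstep : stepCands tp tp.length slot (0 :: live) = none := by
        rw [stepCands_eq, if_pos hfound]
      show (match stepCands tp tp.length slot (0 :: live) with
            | none => true
            | some live' => runSlots tp tp.length live' rest) = _
      rw [hstep]
      rcases hfound with ⟨j, hjmem, hc, hjm⟩
      have hc' : slot.contains (tp.getD j "") = true := by simpa using hc
      have hdrop : tp.drop (j + 1) = [] := by rw [hjm]; simp
      have hpmj : pmatch (tp.drop j) (slot :: rest) = true := by
        rw [hpm j (by omega), hdrop]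
        simp only [pmatch, Bool.and_true]
        simpa using hc
      rcases List.mem_cons.mp hjmem with rfl | h
      · have : pmatch tp (slot :: rest) = true := by simpa using hpmj
        simp [anyStart, this]
      · have : live.any (fun j => pmatch (tp.drop j) (slot :: rest)) = true :=
          List.any_eq_true.mpr ⟨j, h, hpmj⟩
        simp [this]
    · have hstep : stepCands tp tp.length slot (0 :: live) =
          some (((0 :: live).filter (fun j => slot.contains (tp.getD j ""))).map (· + 1)) := by
        rw [stepCands_eq, if_neg hfound]
      show (match stepCands tp tp.length slot (0 :: live) with
            | none => true
            | some live' => runSlots tp tp.length live' rest) = _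
      rw [hstep]
      have hlive' : ∀ j ∈ ((0 :: live).filter (fun j => slot.contains (tp.getD j ""))).map (· + 1),
          j < tp.length := by
        intro j hj
        rcases List.mem_map.mp hj with ⟨k, hk, rfl⟩
        have hkmem := (List.mem_filter.mp hk).1
        have hkc : tp[k]?.getD "" ∈ slot := by
          have := (List.mem_filter.mp hk).2; simpa using this
        have hne : k + 1 ≠ tp.length := by
          intro he; exact hfound ⟨k, hkmem, hkc, he⟩
        have := h0 k hkmem
        omega
      show runSlots tp tp.length _ rest = _
      rw [ih _ hlive']
      have hany : (((0 :: live).filter (fun j => slot.contains (tp.getD j ""))).map (· + 1)).any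
            (fun j => pmatch (tp.drop j) rest)
          = (0 :: live).any (fun j => slot.contains (tp.getD j "") && pmatch (tp.drop (j + 1)) rest) := by
        rw [List.any_map, List.any_filter]
        simp only [Function.comp_def]
      rw [hany]
      have hps : ∀ j ∈ (0 :: live), (slot.contains (tp.getD j "") && pmatch (tp.drop (j + 1)) rest)
          = pmatch (tp.drop j) (slot :: rest) := by
        intro j hj; rw [hpm j (h0 j hj)]
      rw [any_congr_mem _ hps]
      simp only [List.any_cons, List.drop_zero]
      simp only [anyStart]
      cases pmatch tp (slot :: rest) <;> cases live.any (fun j => pmatch (tp.drop j) (slot :: rest)) <;>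
        cases anyStart tp rest <;> rfl

-- A-side: the check of one full-length window equals pmatch
theorem wall_eq_pmatch : ∀ (tp : List String) (tr : List (List String)), tp.length ≤ tr.length →
    (((tr.take tp.length).zip tp).all (fun p => p.1.any (fun note => note == p.2))) = pmatch tp tr := by
  intro tp
  induction tp with
  | nil => intro tr _; simp [pmatch]
  | cons t ts ih =>
    intro tr hlen
    cases tr with
    | nil => simp at hlen
    | cons s ss =>
      simp only [List.length_cons, List.take_succ_cons, List.zip_cons_cons, List.all_cons, pmatch]
      rw [ih ss (by simpa using hlen)]
      have hone : ∀ s : List String, s.any (fun note => note == t) = s.contains t := by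
        intro s
        cases hmem : s.contains t with
        | true =>
          have ht : t ∈ s := by simpa using hmem
          exact List.any_eq_true.mpr ⟨t, ht, by simp⟩
        | false =>
          have hnm : t ∉ s := by simpa using hmem
          apply List.any_eq_false.mpr
          intro x hx
          by_cases hxt : x = t
          · exact absurd (hxt ▸ hx) hnm
          · simpa using hxt
      rw [hone s]

-- A-side: the sliding-window any (in drop/take form) equals anyStart
theorem aside_eq_anyStart (tp : List String) (hm : 0 < tp.length) :
    ∀ tr : List (List String), tp.length ≤ tr.length →
      ((List.range (tr.length - tp.length + 1)).any
        (fun k => ((((tr.drop k).take tp.length).zip tp).all (fun p => p.1.any (fun note => note == p.2)))))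
        = anyStart tp tr := by
  intro tr
  induction tr with
  | nil =>
    intro h
    have : tp.length = 0 := by simpa using h
    omega
  | cons s ss ih =>
    intro h
    by_cases hss : tp.length ≤ ss.length
    · have hlen : (s :: ss).length - tp.length + 1 = (ss.length - tp.length + 1) + 1 := by
        simp only [List.length_cons]; omega
      rw [hlen, any_range_succ]
      simp only [List.drop_zero, List.drop_succ_cons]
      rw [ih hss, wall_eq_pmatch tp (s :: ss) h]
      rfl
    · push_neg at hss
      have hlen : (s :: ss).length - tp.length + 1 = 1 := by
        simp only [List.length_cons] at h ⊢; omega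
      rw [hlen]
      simp only [List.range_one, List.any_cons, List.any_nil, Bool.or_false, List.drop_zero]
      rw [wall_eq_pmatch tp (s :: ss) h]
      show _ = anyStart tp (s :: ss)
      simp only [anyStart]
      rw [anyStart_of_short tp ss hss]
      simp

-- ===== VERDICT (by name: the statement is the Claim_ definition above) =====
theorem check_target_pattern_spec : Claim_equal_check_target_pattern := by
  intro tr tp _
  unfold Spec_check_target_pattern
  unfold check_target_pattern check_target_pattern_alt slidingWindow
  by_cases hlt : tr.length < tp.length
  · have htpne : ¬ tp.length = 0 := by omega
    simp [hlt, htpne]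
  · push_neg at hlt
    by_cases hm0 : tp.length = 0
    · have htp : tp = [] := List.length_eq_zero_iff.mp hm0
      subst htp
      have hA : ¬ tr.length < ([] : List String).length := by simp
      rw [if_neg hA, if_pos (by decide : ((([] : List String).length == 0) = true))]
      simp only [List.zip_nil_right, List.all_nil]
      rw [List.any_eq_true]
      refine ⟨_, List.mem_map.mpr ⟨0, ?_, rfl⟩, rfl⟩
      exact PySem.List.mem_pyRange_one.mpr ⟨le_refl 0, by push_cast; omega⟩
    · have hm : 0 < tp.length := Nat.pos_of_ne_zero hm0
      have hne : (tp.length == 0) = false := by simpa using hm0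
      have hnlt : ¬ tr.length < tp.length := by omega
      simp only [hne, Bool.false_eq_true, if_false, if_neg hnlt]
      rw [runSlots_eq tp hm tr [] (by intro j hj; simp at hj)]
      simp only [List.any_nil, Bool.false_or]
      rw [← aside_eq_anyStart tp hm tr hlt]
      rw [PySem.List.pyRange_one]
      have htoNat : (((tr.length : Int) - tp.length + 1) - 0).toNat = tr.length - tp.length + 1 := by
        omega
      rw [htoNat, List.map_map, List.any_map]
      simp only [Function.comp_def, zero_add]
      apply any_congr_mem
      intro k _
      rw [PySem.List.slice_natCast_add]
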